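-- pv_equiv track=rewrite | github.com/austinc3030/school_archive | src/AES/Utilities.py | split_hex_string
-- ===== SOURCE A (Python) =====
-- def split_hex_string(string_to_split):
--     """
--     Split a string of hex numbers to a list of hex numbers.
--
--     :param string_to_split: The string to split
--
--     :return: The split string
--     """
--     split_hex = []
--     hex_number = ""
--
--     for index, character in enumerate(string_to_split):
--         if len(hex_number) == 0:
--             hex_number += character
--         elif len(hex_number) == 1:
--             hex_number += character
--
--         if len(hex_number) == 2:
--             split_hex.append(hex_number)
--             hex_number = ""
--
--     return split_hex
-- ===== SOURCE B (Python) =====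
-- def split_hex_string(string_to_split):
--     """Split a string of hex characters into two-character chunks.
--
--     Simpler: slice fixed-size chunks at even offsets instead of scanning
--     character by character into a buffer; a trailing unpaired character is
--     dropped (stop bound len-1), exactly as the original.
--     """
--     return [string_to_split[i:i + 2]
--             for i in range(0, len(string_to_split) - 1, 2)]
-- ===== Notes on version B (the rewrite author's own statement) =====
-- stated objective: simpler
-- what changed: Replaces the character-by-character scan with an accumulator buffer by a direct stride-2 slicing over start indices (range(0, len-1, 2)), maintaining no state at all.
import Mathlib
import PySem

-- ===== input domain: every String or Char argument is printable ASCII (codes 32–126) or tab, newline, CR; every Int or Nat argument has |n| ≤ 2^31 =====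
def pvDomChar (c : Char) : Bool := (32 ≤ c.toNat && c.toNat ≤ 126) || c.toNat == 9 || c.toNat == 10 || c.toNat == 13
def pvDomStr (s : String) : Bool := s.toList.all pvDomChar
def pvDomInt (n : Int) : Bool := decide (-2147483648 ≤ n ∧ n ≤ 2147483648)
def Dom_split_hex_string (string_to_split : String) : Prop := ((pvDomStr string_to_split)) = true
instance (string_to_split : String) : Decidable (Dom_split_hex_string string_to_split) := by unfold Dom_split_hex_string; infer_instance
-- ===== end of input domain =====

-- B replaces A's character-by-character scan with stateless stride-2 slicing (objective: simpler).

-- ===== PORT A =====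
-- hex_number (a Python string built char by char) is carried as its list of characters;
-- '+=' is '++ [c]', appending it to split_hex is appending 'String.ofList hex'.
def pvStepA (st : List String × List Char) (c : Char) : List String × List Char :=
  let acc := st.1
  let hex := st.2
  let hex := if hex.length == 0 then hex ++ [c]
             else if hex.length == 1 then hex ++ [c]
             else hex
  if hex.length == 2 then (acc ++ [String.ofList hex], []) else (acc, hex)

def split_hex_string (string_to_split : String) : List String :=
  -- for index, character in enumerate(...): index is unused by the body
  ((PySem.List.enumerate string_to_split.toList 0).foldl
      (fun st p => pvStepA st p.2) ([], [])).1

-- ===== PORT B =====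
def split_hex_string_alt (string_to_split : String) : List String :=
  (PySem.List.pyRange 0 (PySem.Str.len string_to_split - 1) 2).map
    (fun i => PySem.Str.slice string_to_split (some i) (some (i + 2)))

-- ===== PRECONDITION & SPEC =====
def Spec_split_hex_string (string_to_split : String) (out : List String) : Prop := out = split_hex_string_alt string_to_split
instance (string_to_split : String) (out : List String) : Decidable (Spec_split_hex_string string_to_split out) := by unfold Spec_split_hex_string; infer_instance

-- ===== CLAIM (what is proved, stated in full; the proofs are below) =====
def Claim_equal_split_hex_string : Prop := ∀ (string_to_split : String), Dom_split_hex_string string_to_split → Spec_split_hex_string string_to_split (split_hex_string string_to_split)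

-- ===== LEMMAS AND PROOFS =====

/-- The common value: the list of two-character chunks, trailing odd char dropped. -/
def pvPairs : List Char → List String
  | [] => []
  | [_] => []
  | a :: b :: t => String.ofList [a, b] :: pvPairs t

theorem pvEnum_cons (c : Char) (l : List Char) (s : Int) :
    PySem.List.enumerate (c :: l) s = (s, c) :: PySem.List.enumerate l (s + 1) := by
  simp [PySem.List.enumerate]

theorem pvA_inv (l : List Char) : ∀ (s : Int) (acc : List String),
    ((PySem.List.enumerate l s).foldl (fun st p => pvStepA st p.2) (acc, [])).1
      = acc ++ pvPairs l := by
  induction l using pvPairs.induct with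
  | case1 => intro s acc; simp [PySem.List.enumerate, pvPairs]
  | case2 a => intro s acc; simp [PySem.List.enumerate, pvPairs, pvStepA]
  | case3 a b t ih =>
      intro s acc
      rw [pvEnum_cons, pvEnum_cons]
      simp only [List.foldl_cons]
      have h1 : pvStepA (acc, []) a = (acc, [a]) := by simp [pvStepA]
      have h2 : pvStepA (acc, [a]) b = (acc ++ [String.ofList [a, b]], []) := by
        simp [pvStepA]
      rw [h1, h2, ih]
      simp [pvPairs]

theorem pvRange_two_cons (a b : Int) (h : a < b) :
    PySem.List.pyRange a b 2 = a :: PySem.List.pyRange (a + 2) b 2 := by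
  rw [PySem.List.pyRange_of_pos a b (by norm_num),
      PySem.List.pyRange_of_pos (a + 2) b (by norm_num)]
  rw [if_pos h]
  have hk : ((b - a + 2 - 1) / 2).toNat
      = (if a + 2 < b then ((b - (a + 2) + 2 - 1) / 2).toNat else 0) + 1 := by
    split_ifs with h2 <;> omega
  rw [hk, List.range_succ_eq_map]
  simp only [List.map_cons, List.map_map]
  refine List.cons_eq_cons.mpr ⟨by push_cast; ring, ?_⟩
  apply List.map_congr_left
  intro k _
  simp only [Function.comp_apply, Nat.succ_eq_add_one]
  push_cast
  ring

theorem pvRange_two_shift (b : Int) :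
    PySem.List.pyRange 2 b 2 = (PySem.List.pyRange 0 (b - 2) 2).map (· + 2) := by
  rw [PySem.List.pyRange_of_pos 2 b (by norm_num),
      PySem.List.pyRange_of_pos 0 (b - 2) (by norm_num)]
  have hc : (if (2:Int) < b then ((b - 2 + 2 - 1) / 2).toNat else 0)
      = (if (0:Int) < b - 2 then ((b - 2 - 0 + 2 - 1) / 2).toNat else 0) := by
    split_ifs <;> omega
  rw [hc, List.map_map]
  apply List.map_congr_left
  intro k _
  simp only [Function.comp_apply]
  ring

theorem pvB_inv (l : List Char) :
    (PySem.List.pyRange 0 ((l.length : Int) - 1) 2).map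
      (fun i => String.ofList (PySem.List.slice l (some i) (some (i + 2)))) = pvPairs l := by
  induction l using pvPairs.induct with
  | case1 =>
      rw [PySem.List.pyRange_of_pos _ _ (by norm_num)]
      norm_num [pvPairs]
  | case2 a =>
      rw [PySem.List.pyRange_of_pos _ _ (by norm_num)]
      norm_num [pvPairs]
  | case3 a b t ih =>
      have hlen : ((a :: b :: t).length : Int) - 1 = (t.length : Int) + 1 := by
        simp; try omega
      rw [hlen, pvRange_two_cons 0 ((t.length : Int) + 1) (by omega),
          show (0:Int) + 2 = 2 by norm_num, pvRange_two_shift, List.map_cons, List.map_map]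
      have hhead : String.ofList (PySem.List.slice (a :: b :: t) (some 0) (some (0 + 2)))
          = String.ofList [a, b] := by
        rw [PySem.List.slice_toNat]
        all_goals first | rfl | omega
      have htail : ((PySem.List.pyRange 0 ((t.length : Int) + 1 - 2) 2).map
            ((fun i => String.ofList (PySem.List.slice (a :: b :: t) (some i) (some (i + 2)))) ∘ (· + 2)))
          = pvPairs t := by
        rw [← ih]
        rw [show ((t.length : Int) + 1 - 2) = (t.length : Int) - 1 by ring]
        apply List.map_congr_left
        intro i hi
        have h0 : 0 ≤ i := by
          rcases (PySem.List.mem_pyRange_iff_of_pos (by norm_num) i).mp hi with ⟨h1, _, _⟩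
          exact h1
        simp only [Function.comp_apply]
        rw [PySem.List.slice_toNat, PySem.List.slice_toNat]
        all_goals try omega
        congr 1
        have e2 : (i + 2 + 2).toNat - (i + 2).toNat = 2 := by omega
        have e3 : (i + 2).toNat - i.toNat = 2 := by omega
        have e1 : (i + 2).toNat = i.toNat + 1 + 1 := by omega
        rw [e2, e3, e1, List.drop_succ_cons, List.drop_succ_cons]
      rw [hhead, htail]
      rfl

theorem pvAlt_eq (s : String) :
    split_hex_string_alt s = pvPairs s.toList := by
  unfold split_hex_string_alt
  rw [← pvB_inv s.toList]
  rw [show PySem.Str.len s = (s.toList.length : Int) by simp [PySem.Str.len]]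
  apply List.map_congr_left
  intro i _
  apply String.toList_inj.mp
  rw [PySem.Str.toList_slice]
  simp [PySem.Chars.slice_eq_listSlice]

-- ===== VERDICT (by name: the statement is the Claim_ definition above) =====
theorem split_hex_string_spec : Claim_equal_split_hex_string := by
  intro s _
  unfold Spec_split_hex_string
  rw [pvAlt_eq]
  unfold split_hex_string
  rw [pvA_inv s.toList 0 []]
  simp
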